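-- pv_equiv track=rewrite | github.com/gnlenfn/notebook | codes/programmers/배달.py | solution
-- ===== SOURCE A (Python) =====
-- from collections import defaultdict
-- import heapq
--
-- def solution(N, road, K):
--     answer = 0
--     graph = defaultdict(list)
--     for depart, goal, cost in road:
--         graph[depart].append((goal, cost))
--         graph[goal].append((depart, cost))
--     cost_map = dijkstra(graph, 1)
--     for town in cost_map:
--         if cost_map[town] <= K:
--             answer += 1
--     return answer
--
-- def dijkstra(graph, start):
--     distances = {node: float("inf") for node in graph}
--     distances[start] = 0
--     queue = []
--     heapq.heappush(queue, [distances[start], start])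
--     while queue:
--         current_distance, current_node = heapq.heappop(queue)
--         if distances[current_node] < current_distance:
--             continue
--         for adjacent, weight in graph[current_node]:
--             distance = current_distance + weight
--             if distance < distances[adjacent]:
--                 distances[adjacent] = distance
--                 heapq.heappush(queue, [distance, adjacent])
--     return distances
-- ===== SOURCE B (Python) =====
-- def solution(N, road, K):
--     # Bellman-Ford style relaxation: no heap, no adjacency map; only reachable
--     # towns are ever recorded (unreachable ones are infinitely far and never counted).
--     dist = {1: 0}
--     edges = []
--     for a, b, c in road:
--         edges.append((a, b, c))
--         edges.append((b, a, c))
--     changed = True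
--     while changed:
--         changed = False
--         for u, v, c in edges:
--             if u in dist:
--                 nd = dist[u] + c
--                 if v not in dist or nd < dist[v]:
--                     dist[v] = nd
--                     changed = True
--     return sum(1 for x in dist.values() if x <= K)
-- ===== Notes on version B (the rewrite author's own statement) =====
-- stated objective: simpler
-- what changed: Replaces heap-based Dijkstra (defaultdict adjacency + heapq priority queue with stale-entry skipping) by a plain Bellman-Ford relaxation over the doubled edge list, repeated until no distance changes, tracking only reachable towns.
-- outside the precondition, e.g. on solution(3, [(2, 3, -1)], 2): A returns 1, B returns 1
import Mathlib
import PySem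

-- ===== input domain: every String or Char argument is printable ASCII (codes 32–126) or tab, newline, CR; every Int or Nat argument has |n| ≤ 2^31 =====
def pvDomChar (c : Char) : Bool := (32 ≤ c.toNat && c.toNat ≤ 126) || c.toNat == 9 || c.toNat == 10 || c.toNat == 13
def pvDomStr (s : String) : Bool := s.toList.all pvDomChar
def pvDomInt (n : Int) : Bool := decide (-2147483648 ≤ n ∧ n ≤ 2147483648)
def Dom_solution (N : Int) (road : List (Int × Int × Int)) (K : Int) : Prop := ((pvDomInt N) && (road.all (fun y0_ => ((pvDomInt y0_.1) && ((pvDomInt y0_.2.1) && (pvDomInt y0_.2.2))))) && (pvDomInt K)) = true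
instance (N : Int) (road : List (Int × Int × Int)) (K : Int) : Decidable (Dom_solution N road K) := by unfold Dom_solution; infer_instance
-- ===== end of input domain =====

-- B replaces the heap-based Dijkstra by a Bellman-Ford relaxation over the edge
-- list (objective: simpler).  Equivalence of the RETURN value is proved on roads
-- with nonnegative costs (Pre_solution); on a negative-cost road reachable from
-- town 1 the Python A loops forever (an undirected negative edge is a negative
-- cycle), so negative costs lie outside Pre_solution.

-- ===== PORT A =====
-- Python compares the 2-element lists [distance, node] lexicographically.
def pvLexLt (a b : Int × Int) : Bool := a.1 < b.1 || (a.1 == b.1 && a.2 < b.2)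

-- heapq._siftdown(heap, startpos, pos) with newitem = heap[pos] (CPython);
-- exact: all indices touched are nonnegative and in range at every call site.
def pvSiftdown (heap : List (Int × Int)) (startpos pos : Nat) (newitem : Int × Int) :
    List (Int × Int) :=
  if _h : startpos < pos then
    let parentpos := (pos - 1) / 2
    let parent := heap.getD parentpos (0, 0)
    if pvLexLt newitem parent then pvSiftdown (heap.set pos parent) startpos parentpos newitem
    else heap.set pos newitem
  else heap.set pos newitem
termination_by pos
decreasing_by omega

-- heapq._siftup's while loop (CPython), ending in _siftdown.
def pvSiftupLoop (heap : List (Int × Int)) (endpos startpos pos : Nat) (newitem : Int × Int) :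
    List (Int × Int) :=
  if _h : 2 * pos + 1 < endpos then
    let c0 := 2 * pos + 1
    let c := if c0 + 1 < endpos ∧ ¬(pvLexLt (heap.getD c0 (0, 0)) (heap.getD (c0 + 1) (0, 0)) = true)
             then c0 + 1 else c0
    pvSiftupLoop (heap.set pos (heap.getD c (0, 0))) endpos startpos c newitem
  else pvSiftdown heap startpos pos newitem
termination_by endpos - pos
decreasing_by split <;> omega

def pvHeappush (heap : List (Int × Int)) (item : Int × Int) : List (Int × Int) :=
  pvSiftdown (heap ++ [item]) 0 heap.length item

-- heapq.heappop; only called on a nonempty heap (the while-loop guard).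
def pvHeappop (heap : List (Int × Int)) : (Int × Int) × List (Int × Int) :=
  let lastelt := heap.getLast?.getD (0, 0)
  let rest := heap.dropLast
  if rest.isEmpty then (lastelt, rest)
  else
    let returnitem := rest.getD 0 (0, 0)
    let rest := rest.set 0 lastelt
    (returnitem, pvSiftupLoop rest rest.length 0 0 (rest.getD 0 (0, 0)))

-- float("inf") is only ever compared against ints, never mixed into arithmetic:
-- distances values are modelled as Option Int with none = inf (exact).
def pvLtOptInt (a : Option Int) (b : Int) : Bool :=
  match a with | none => false | some x => decide (x < b)
def pvLtIntOpt (a : Int) (b : Option Int) : Bool :=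
  match b with | none => true | some y => decide (a < y)
def pvLeOptInt (a : Option Int) (b : Int) : Bool :=
  match a with | none => false | some x => decide (x ≤ b)

def pvGraph (road : List (Int × Int × Int)) : PySem.Dict Int (List (Int × Int)) :=
  road.foldl
    (fun g t => (g.modify t.1 [] (· ++ [(t.2.1, t.2.2)])).modify t.2.1 [] (· ++ [(t.1, t.2.2)]))
    PySem.Dict.empty

-- the while-loop of dijkstra; fuel only makes the recursion total (the loop
-- exits by itself: Pre_solution bounds its iteration count below pvFuelA)
def pvDijkLoop (graph : PySem.Dict Int (List (Int × Int))) (dist : PySem.Dict Int (Option Int))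
    (queue : List (Int × Int)) (fuel : Nat) : PySem.Dict Int (Option Int) :=
  match fuel with
  | 0 => dist
  | fuel + 1 =>
    if queue.isEmpty then dist
    else
      let pr := pvHeappop queue
      if pvLtOptInt (dist.getD pr.1.2 none) pr.1.1 then pvDijkLoop graph dist pr.2 fuel
      else
        let st := (graph.getD pr.1.2 []).foldl
          (fun (st : PySem.Dict Int (Option Int) × List (Int × Int)) av =>
            let distance := pr.1.1 + av.2
            if pvLtIntOpt distance (st.1.getD av.1 none) then
              (st.1.insert av.1 (some distance), pvHeappush st.2 (distance, av.1))
            else st)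
          (dist, pr.2)
        pvDijkLoop graph st.1 st.2 fuel

def pvKeyBound (road : List (Int × Int × Int)) : Nat := 2 * road.length + 1
def pvCostBound (road : List (Int × Int × Int)) : Nat := (road.map (fun t => t.2.2.toNat)).sum
def pvFuelA (road : List (Int × Int × Int)) : Nat :=
  2 * pvKeyBound road * (pvKeyBound road * pvCostBound road + 2) + 4

def solution (N : Int) (road : List (Int × Int × Int)) (K : Int) : Int :=
  let graph := pvGraph road
  let dist0 := graph.keys.foldl (fun d k => d.insert k (none : Option Int)) PySem.Dict.empty
  let dist1 := dist0.insert 1 (some 0)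
  let queue := pvHeappush [] ((dist1.getD 1 none).getD 0, 1)
  let costMap := pvDijkLoop graph dist1 queue (pvFuelA road)
  costMap.keys.foldl (fun a t => if pvLeOptInt (costMap.getD t none) K then a + 1 else a) 0

-- ===== PORT B =====
def pvEdges (road : List (Int × Int × Int)) : List (Int × Int × Int) :=
  road.foldl (fun es t => es ++ [(t.1, t.2.1, t.2.2)] ++ [(t.2.1, t.1, t.2.2)]) []

-- one pass of 'for u, v, c in edges: …' (absent key = not in dist)
def pvBFPass (edges : List (Int × Int × Int)) (st : PySem.Dict Int Int × Bool) :
    PySem.Dict Int Int × Bool :=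
  edges.foldl
    (fun st e =>
      match st.1.get? e.1 with
      | none => st
      | some du =>
        let nd := du + e.2.2
        match st.1.get? e.2.1 with
        | none => (st.1.insert e.2.1 nd, true)
        | some dv => if nd < dv then (st.1.insert e.2.1 nd, true) else st)
    st

-- 'while changed:' — fuel only makes the recursion total (Pre_solution bounds
-- the number of changing passes below pvFuelB)
def pvBFLoop (edges : List (Int × Int × Int)) (dist : PySem.Dict Int Int) (fuel : Nat) :
    PySem.Dict Int Int :=
  match fuel with
  | 0 => dist
  | fuel + 1 =>
    let st := pvBFPass edges (dist, false)
    if st.2 then pvBFLoop edges st.1 fuel else st.1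

def pvFuelB (road : List (Int × Int × Int)) : Nat :=
  pvKeyBound road * (pvKeyBound road * pvCostBound road + 2) + 2

def solution_alt (N : Int) (road : List (Int × Int × Int)) (K : Int) : Int :=
  let dist := pvBFLoop (pvEdges road) (PySem.Dict.empty.insert 1 0) (pvFuelB road)
  dist.values.foldl (fun a x => if x ≤ K then a + 1 else a) 0

-- ===== PRECONDITION & SPEC =====
-- Pre_solution excludes roads with a negative cost: there A's Dijkstra loops
-- forever whenever such an edge is reachable from town 1 (an undirected negative
-- edge is a negative cycle), and nonnegative costs are the task's natural domain.
def Pre_solution (N : Int) (road : List (Int × Int × Int)) (K : Int) : Prop :=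
  ∀ t ∈ road, 0 ≤ t.2.2
instance (N : Int) (road : List (Int × Int × Int)) (K : Int) : Decidable (Pre_solution N road K) := by
  unfold Pre_solution; infer_instance

def pvWitness_solution : Int × (List (Int × Int × Int)) × Int :=
  (5, [(1, 2, 1), (2, 3, 3), (5, 2, 2), (1, 4, 2)], 3)

def Spec_solution (N : Int) (road : List (Int × Int × Int)) (K : Int) (out : Int) : Prop :=
  out = solution_alt N road K
instance (N : Int) (road : List (Int × Int × Int)) (K : Int) (out : Int) :
    Decidable (Spec_solution N road K out) := by unfold Spec_solution; infer_instance

-- ===== CLAIM (what is proved, stated in full; the proofs are below) =====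
def Claim_equal_solution : Prop := ∀ (N : Int) (road : List (Int × Int × Int)) (K : Int),
  Dom_solution N road K → Pre_solution N road K → Spec_solution N road K (solution N road K)

-- ===== LEMMAS AND PROOFS =====

-- ---------- semantic layer: edges, paths, fixpoints ----------

def pvEdge (road : List (Int × Int × Int)) (u v c : Int) : Prop :=
  (u, v, c) ∈ road ∨ (v, u, c) ∈ road

def pvSteps (road : List (Int × Int × Int)) : Int → List (Int × Int) → Int → Prop
  | u, [], v => u = v
  | u, (w, c) :: l, v => pvEdge road u w c ∧ pvSteps road w l v

def pvCost (l : List (Int × Int)) : Int := (l.map (·.2)).sum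

def pvFix (road : List (Int × Int × Int)) (f : Int → Option Int) : Prop :=
  ∀ u v c, pvEdge road u v c → ∀ x, f u = some x → ∃ y, f v = some y ∧ y ≤ x + c

def pvWSound (road : List (Int × Int × Int)) (f : Int → Option Int) : Prop :=
  ∀ v x, f v = some x → ∃ l, pvSteps road 1 l v ∧ pvCost l = x

def pvSInv (road : List (Int × Int × Int)) (f : Int → Option Int) : Prop :=
  ∀ v x, f v = some x → ∃ l, pvSteps road 1 l v ∧ pvCost l = x ∧ (1 :: l.map (·.1)).Nodup ∧
    ∀ l1 w c l2, l = l1 ++ (w, c) :: l2 → ∃ y, f w = some y ∧ y ≤ pvCost l1 + c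

def pvRank (B : Nat) : Option Int → Nat
  | none => B + 1
  | some x => x.toNat

def pvM (keys : List Int) (B : Nat) (f : Int → Option Int) : Nat :=
  (keys.map (fun k => pvRank B (f k))).sum

def pvKeysA (road : List (Int × Int × Int)) : List Int :=
  if (1 : Int) ∈ (pvGraph road).keys then (pvGraph road).keys else (pvGraph road).keys ++ [1]

def pvBn (road : List (Int × Int × Int)) : Nat := pvKeyBound road * pvCostBound road

def pvPre (road : List (Int × Int × Int)) : Prop := ∀ t ∈ road, 0 ≤ t.2.2

-- ---------- heap permutation lemmas ----------

theorem pv_perm_set_set {α : Type} [DecidableEq α] (l : List α) (i j : Nat) (d x : α)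
    (hi : i < l.length) (hj : j < l.length) (hij : i ≠ j) :
    ((l.set i (l.getD j d)).set j x).Perm (l.set i x) := by
  rw [List.perm_iff_count]
  intro y
  have hgd : l.getD j d = l[j] := List.getD_eq_getElem l d hj
  have h1 := List.count_set (a := l.getD j d) (b := y) (l := l) (i := i) hi
  have hj1 : j < (l.set i (l.getD j d)).length := by simpa using hj
  have h2 := List.count_set (a := x) (b := y) (l := l.set i (l.getD j d)) (i := j) hj1
  have h3 := List.count_set (a := x) (b := y) (l := l) (i := i) hi
  have hjj : (l.set i (l.getD j d))[j] = l[j] := by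
    rw [List.getElem_set]; simp [hij]
  have hci : (if (l[i] == y) = true then 1 else 0) ≤ l.count y := by
    split
    · exact List.count_pos_iff.mpr (by rename_i hh; simp only [beq_iff_eq] at hh; exact hh ▸ List.getElem_mem hi)
    · omega
  have hcj : (if (l[j] == y) = true then 1 else 0) ≤ l.count y := by
    split
    · exact List.count_pos_iff.mpr (by rename_i hh; simp only [beq_iff_eq] at hh; exact hh ▸ List.getElem_mem hj)
    · omega
  rw [h2, hjj, h1, hgd, h3]
  split <;> split <;> omega

theorem pvSiftdown_perm (heap : List (Int × Int)) (startpos pos : Nat) (newitem : Int × Int) :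
    pos < heap.length → (pvSiftdown heap startpos pos newitem).Perm (heap.set pos newitem) := by
  fun_induction pvSiftdown heap startpos pos newitem with
  | case1 heap pos h parentpos parent hlt ih =>
    intro hp
    have hpp : parentpos < heap.length := by
      have : parentpos < pos := by omega
      omega
    have hne : pos ≠ parentpos := by
      have : parentpos < pos := by omega
      omega
    have := ih (by simpa using hpp)
    exact this.trans (pv_perm_set_set heap pos parentpos (0,0) newitem hp hpp hne)
  | case2 heap pos h hlt => intro hp; exact List.Perm.refl _
  | case3 heap pos h => intro hp; exact List.Perm.refl _

theorem pvSiftupLoop_perm (heap : List (Int × Int)) (endpos startpos pos : Nat)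
    (newitem : Int × Int) :
    endpos = heap.length → pos < endpos →
      (pvSiftupLoop heap endpos startpos pos newitem).Perm (heap.set pos newitem) := by
  fun_induction pvSiftupLoop heap endpos startpos pos newitem with
  | case1 heap pos h c0 c ih =>
    intro he hp
    have hc : c < endpos := by
      simp only [c, c0]; split <;> omega
    have hc' : c < heap.length := he ▸ hc
    have hlt : pos < c := by simp only [c, c0]; split <;> omega
    have := ih (by simpa using he) (by simpa using hc)
    exact this.trans (pv_perm_set_set heap pos c (0,0) newitem (he ▸ hp) hc' (by omega))
  | case2 heap pos h =>
    intro he hp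
    exact pvSiftdown_perm heap startpos pos newitem (he ▸ hp)

theorem pvHeappush_perm (heap : List (Int × Int)) (item : Int × Int) :
    (pvHeappush heap item).Perm (heap ++ [item]) := by
  unfold pvHeappush
  have hp : heap.length < (heap ++ [item]).length := by simp
  refine (pvSiftdown_perm _ 0 heap.length item hp).trans ?_
  have : (heap ++ [item]).set heap.length item = heap ++ [item] := by
    apply List.ext_getElem (by simp)
    intro i h1 h2
    rw [List.getElem_set]
    split
    · subst i; simp
    · rfl
  rw [this]

theorem pvHeappop_perm (heap : List (Int × Int)) (h : heap ≠ []) :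
    heap.Perm ((pvHeappop heap).1 :: (pvHeappop heap).2) := by
  unfold pvHeappop
  have hlast : heap = heap.dropLast ++ [heap.getLast h] := (List.dropLast_append_getLast h).symm
  have hget : heap.getLast?.getD (0, 0) = heap.getLast h := by
    rw [List.getLast?_eq_some_getLast h]; rfl
  by_cases hd : heap.dropLast.isEmpty
  · simp only [hd, if_pos, hget]
    have hnil : heap.dropLast = [] := List.isEmpty_iff.mp hd
    conv_lhs => rw [hlast, hnil]
    simp [hnil]
  · simp only [hd, if_neg, Bool.false_eq_true, not_false_iff, hget]
    set rest := heap.dropLast with hrest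
    have hne : rest ≠ [] := by simpa [List.isEmpty_iff] using hd
    have h0 : 0 < rest.length := List.length_pos_iff.mpr hne
    have h0' : 0 < (rest.set 0 (heap.getLast h)).length := by simpa using h0
    have hperm := pvSiftupLoop_perm (rest.set 0 (heap.getLast h))
      (rest.set 0 (heap.getLast h)).length 0 0
      ((rest.set 0 (heap.getLast h)).getD 0 (0, 0)) rfl h0'
    have hsetid : (rest.set 0 (heap.getLast h)).set 0
        ((rest.set 0 (heap.getLast h)).getD 0 (0, 0)) = rest.set 0 (heap.getLast h) := by
      rw [List.getD_eq_getElem _ _ h0', List.set_getElem_self]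
    rw [hsetid] at hperm
    refine (List.Perm.trans ?_ (List.Perm.cons _ hperm.symm))
    have hcons : rest = rest[0] :: rest.tail := by
      conv_lhs => rw [← List.cons_head_tail hne]
      rw [List.head_eq_getElem]
    have hset : rest.set 0 (heap.getLast h) = heap.getLast h :: rest.tail := by
      conv_lhs => rw [hcons]
      rfl
    conv_lhs => rw [hlast, hcons]
    rw [hset, List.getD_eq_getElem _ _ h0]
    show List.Perm ((rest[0] :: rest.tail) ++ [heap.getLast h])
      (rest[0] :: heap.getLast h :: rest.tail)
    simp only [List.cons_append]
    exact List.Perm.cons rest[0] (List.perm_append_singleton (heap.getLast h) rest.tail)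

-- ---------- graph / edge-list characterisations ----------

theorem pv_adj_fold (road : List (Int × Int × Int)) :
    ∀ (g : PySem.Dict Int (List (Int × Int))) (u v c : Int),
      ((v, c) ∈ (road.foldl
          (fun g t => (g.modify t.1 [] (· ++ [(t.2.1, t.2.2)])).modify t.2.1 [] (· ++ [(t.1, t.2.2)]))
          g).getD u [] ↔ (v, c) ∈ g.getD u [] ∨ pvEdge road u v c) := by
  induction road with
  | nil => intro g u v c; simp [pvEdge]
  | cons t rs ih =>
    intro g u v c
    rw [List.foldl_cons, ih]
    simp only [PySem.Dict.getD_modify, pvEdge, List.mem_cons]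
    obtain ⟨a, b, w⟩ := t
    by_cases h1 : u = b <;> by_cases h2 : u = a <;> by_cases h3 : b = a <;>
      simp [h1, h2, h3, Prod.ext_iff] <;> first | tauto | omega | aesop

theorem pv_mem_adj (road : List (Int × Int × Int)) (u v c : Int) :
    (v, c) ∈ (pvGraph road).getD u [] ↔ pvEdge road u v c := by
  have := pv_adj_fold road PySem.Dict.empty u v c
  simpa [pvGraph, PySem.Dict.getD_empty] using this

theorem pv_keys_fold (road : List (Int × Int × Int)) :
    ∀ (g : PySem.Dict Int (List (Int × Int))) (u : Int),
      (u ∈ (road.foldl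
          (fun g t => (g.modify t.1 [] (· ++ [(t.2.1, t.2.2)])).modify t.2.1 [] (· ++ [(t.1, t.2.2)]))
          g).keys ↔ u ∈ g.keys ∨ ∃ t ∈ road, t.1 = u ∨ t.2.1 = u) := by
  induction road with
  | nil => intro g u; simp
  | cons t rs ih =>
    intro g u
    rw [List.foldl_cons, ih]
    simp only [PySem.Dict.keys_modify, PySem.Dict.mem_keys_insert, List.mem_cons]
    constructor
    · rintro (h | h)
      · rcases h with h | h | h
        · exact Or.inr ⟨t, Or.inl rfl, Or.inr h.symm⟩
        · exact Or.inr ⟨t, Or.inl rfl, Or.inl h.symm⟩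
        · exact Or.inl h
      · rcases h with ⟨t', ht', h'⟩; exact Or.inr ⟨t', Or.inr ht', h'⟩
    · rintro (h | ⟨t', ht' | ht', h'⟩)
      · exact Or.inl (Or.inr (Or.inr h))
      · subst ht'; rcases h' with h' | h'
        · exact Or.inl (Or.inr (Or.inl h'.symm))
        · exact Or.inl (Or.inl h'.symm)
      · exact Or.inr ⟨t', ht', h'⟩

theorem pv_mem_graph_keys (road : List (Int × Int × Int)) (u : Int) :
    u ∈ (pvGraph road).keys ↔ ∃ t ∈ road, t.1 = u ∨ t.2.1 = u := by
  have := pv_keys_fold road PySem.Dict.empty u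
  simpa [pvGraph, PySem.Dict.keys_empty] using this

theorem pv_nodup_fold (road : List (Int × Int × Int)) :
    ∀ (g : PySem.Dict Int (List (Int × Int))), g.keys.Nodup →
      (road.foldl
        (fun g t => (g.modify t.1 [] (· ++ [(t.2.1, t.2.2)])).modify t.2.1 [] (· ++ [(t.1, t.2.2)]))
        g).keys.Nodup := by
  induction road with
  | nil => intro g hg; simpa
  | cons t rs ih =>
    intro g hg
    rw [List.foldl_cons]
    apply ih
    rw [PySem.Dict.keys_modify]
    apply PySem.Dict.nodup_keys_insert
    rw [PySem.Dict.keys_modify]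
    exact PySem.Dict.nodup_keys_insert _ _ _ hg

theorem pv_nodup_graph_keys (road : List (Int × Int × Int)) : (pvGraph road).keys.Nodup := by
  apply pv_nodup_fold road PySem.Dict.empty
  simp

theorem pv_nodup_keysA (road : List (Int × Int × Int)) : (pvKeysA road).Nodup := by
  unfold pvKeysA
  split
  · exact pv_nodup_graph_keys road
  · rename_i h
    rw [List.nodup_append]
    refine ⟨pv_nodup_graph_keys road, List.nodup_singleton _, ?_⟩
    intro a ha b hb
    rw [List.mem_singleton] at hb
    subst hb
    exact fun hab => h (hab ▸ ha)

theorem pv_one_mem_keysA (road : List (Int × Int × Int)) : (1 : Int) ∈ pvKeysA road := by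
  unfold pvKeysA
  split
  · assumption
  · simp

theorem pv_graph_keys_subset (road : List (Int × Int × Int)) :
    ∀ v ∈ (pvGraph road).keys, v ∈ pvKeysA road := by
  intro v hv
  unfold pvKeysA
  split <;> simp [hv]

theorem pv_endpoints_len (road : List (Int × Int × Int)) :
    (road.flatMap (fun t => [t.1, t.2.1])).length = 2 * road.length := by
  induction road with
  | nil => simp
  | cons t rs ih => simp [ih]; omega

theorem pv_graph_keys_len (road : List (Int × Int × Int)) :
    (pvGraph road).keys.length ≤ 2 * road.length := by
  have hsub : (pvGraph road).keys ⊆ road.flatMap (fun t => [t.1, t.2.1]) := by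
    intro u hu
    rcases (pv_mem_graph_keys road u).mp hu with ⟨t, ht, h | h⟩ <;>
      · refine List.mem_flatMap.mpr ⟨t, ht, ?_⟩; simp [h]
  have h1 := (List.toFinset_card_of_nodup (pv_nodup_graph_keys road)).symm
  calc (pvGraph road).keys.length = (pvGraph road).keys.toFinset.card := h1
    _ ≤ (road.flatMap (fun t => [t.1, t.2.1])).toFinset.card := by
        apply Finset.card_le_card
        intro a ha; simp only [List.mem_toFinset] at ha ⊢; exact hsub ha
    _ ≤ (road.flatMap (fun t => [t.1, t.2.1])).length := List.toFinset_card_le _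
    _ = 2 * road.length := pv_endpoints_len road

theorem pv_length_keysA (road : List (Int × Int × Int)) :
    (pvKeysA road).length ≤ pvKeyBound road := by
  have := pv_graph_keys_len road
  unfold pvKeysA pvKeyBound
  split <;> simp <;> omega

theorem pv_edge_endpoints (road : List (Int × Int × Int)) (u v c : Int)
    (h : pvEdge road u v c) :
    u ∈ (pvGraph road).keys ∧ v ∈ (pvGraph road).keys := by
  rcases h with h | h
  · exact ⟨(pv_mem_graph_keys road u).mpr ⟨(u, v, c), h, Or.inl rfl⟩,
      (pv_mem_graph_keys road v).mpr ⟨(u, v, c), h, Or.inr rfl⟩⟩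
  · exact ⟨(pv_mem_graph_keys road u).mpr ⟨(v, u, c), h, Or.inr rfl⟩,
      (pv_mem_graph_keys road v).mpr ⟨(v, u, c), h, Or.inl rfl⟩⟩

theorem pv_edge_cost_nonneg (road : List (Int × Int × Int)) (hpre : pvPre road)
    (u v c : Int) (h : pvEdge road u v c) : 0 ≤ c := by
  rcases h with h | h
  · exact hpre _ h
  · exact hpre _ h

theorem pv_edge_cost_le (road : List (Int × Int × Int)) (u v c : Int)
    (h : pvEdge road u v c) : c.toNat ≤ pvCostBound road := by
  unfold pvCostBound
  rcases h with h | h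
  · exact List.le_sum_of_mem (List.mem_map.mpr ⟨(u, v, c), h, rfl⟩)
  · exact List.le_sum_of_mem (List.mem_map.mpr ⟨(v, u, c), h, rfl⟩)

theorem pv_edges_fold (road : List (Int × Int × Int)) :
    ∀ (es : List (Int × Int × Int)) (e : Int × Int × Int),
      (e ∈ road.foldl (fun es t => es ++ [(t.1, t.2.1, t.2.2)] ++ [(t.2.1, t.1, t.2.2)]) es ↔
        e ∈ es ∨ ∃ t ∈ road, e = (t.1, t.2.1, t.2.2) ∨ e = (t.2.1, t.1, t.2.2)) := by
  induction road with
  | nil => intro es e; simp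
  | cons t rs ih =>
    intro es e
    rw [List.foldl_cons, ih]
    simp only [List.mem_append, List.mem_cons, List.not_mem_nil, or_false]
    constructor
    · rintro (((h | h) | h) | ⟨t', ht', h'⟩)
      · exact Or.inl h
      · exact Or.inr ⟨t, Or.inl rfl, Or.inl h⟩
      · exact Or.inr ⟨t, Or.inl rfl, Or.inr h⟩
      · exact Or.inr ⟨t', Or.inr ht', h'⟩
    · rintro (h | ⟨t', ht' | ht', h'⟩)
      · exact Or.inl (Or.inl (Or.inl h))
      · subst ht'; rcases h' with h' | h'
        · exact Or.inl (Or.inl (Or.inr h'))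
        · exact Or.inl (Or.inr h')
      · exact Or.inr ⟨t', ht', h'⟩

theorem pv_mem_edges (road : List (Int × Int × Int)) (e : Int × Int × Int) :
    e ∈ pvEdges road ↔ ∃ t ∈ road, e = (t.1, t.2.1, t.2.2) ∨ e = (t.2.1, t.1, t.2.2) := by
  have := pv_edges_fold road [] e
  simpa [pvEdges] using this

theorem pv_edges_edge (road : List (Int × Int × Int)) (e : Int × Int × Int)
    (h : e ∈ pvEdges road) : pvEdge road e.1 e.2.1 e.2.2 := by
  rcases (pv_mem_edges road e).mp h with ⟨t, ht, rfl | rfl⟩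
  · exact Or.inl ht
  · exact Or.inr ht

theorem pv_edge_mem_edges (road : List (Int × Int × Int)) (u v c : Int)
    (h : pvEdge road u v c) : (u, v, c) ∈ pvEdges road := by
  rcases h with h | h
  · exact (pv_mem_edges road _).mpr ⟨(u, v, c), h, Or.inl rfl⟩
  · exact (pv_mem_edges road _).mpr ⟨(v, u, c), h, Or.inr rfl⟩

-- ---------- path arithmetic ----------

theorem pv_cost_cons (p : Int × Int) (l : List (Int × Int)) :
    pvCost (p :: l) = p.2 + pvCost l := by simp [pvCost]

theorem pv_cost_append (l : List (Int × Int)) (p : Int × Int) :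
    pvCost (l ++ [p]) = pvCost l + p.2 := by simp [pvCost]

theorem pv_steps_append (road : List (Int × Int × Int)) (l : List (Int × Int)) (u v c s : Int)
    (hs : pvSteps road s l u) (he : pvEdge road u v c) :
    pvSteps road s (l ++ [(v, c)]) v := by
  induction l generalizing s with
  | nil => cases hs; exact ⟨he, rfl⟩
  | cons p t ih =>
    obtain ⟨p1, p2⟩ := p
    obtain ⟨h1, h2⟩ := hs
    exact ⟨h1, ih p1 h2⟩

theorem pv_steps_edge_mem (road : List (Int × Int × Int)) :
    ∀ (l : List (Int × Int)) (u v : Int), pvSteps road u l v →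
      ∀ p ∈ l, ∃ a, pvEdge road a p.1 p.2 := by
  intro l
  induction l with
  | nil => intro u v h p hp; simp at hp
  | cons q t ih =>
    intro u v h p hp
    obtain ⟨q1, q2⟩ := q
    obtain ⟨h1, h2⟩ := h
    rcases List.mem_cons.mp hp with rfl | hp'
    · exact ⟨u, h1⟩
    · exact ih q1 v h2 p hp'

theorem pv_cost_nonneg (road : List (Int × Int × Int)) (hpre : pvPre road) :
    ∀ (l : List (Int × Int)) (u v : Int), pvSteps road u l v → 0 ≤ pvCost l := by
  intro l
  induction l with
  | nil => intro u v h; simp [pvCost]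
  | cons q t ih =>
    intro u v h
    obtain ⟨q1, q2⟩ := q
    obtain ⟨h1, h2⟩ := h
    have := pv_edge_cost_nonneg road hpre _ _ _ h1
    have := ih q1 v h2
    rw [pv_cost_cons]
    simp only at *
    omega

theorem pv_steps_nodes_mem (road : List (Int × Int × Int)) :
    ∀ (l : List (Int × Int)) (u v : Int), pvSteps road u l v →
      ∀ p ∈ l, p.1 ∈ (pvGraph road).keys := by
  intro l u v h p hp
  obtain ⟨a, ha⟩ := pv_steps_edge_mem road l u v h p hp
  exact (pv_edge_endpoints road a p.1 p.2 ha).2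

theorem pv_cost_le_bound (road : List (Int × Int × Int)) (hpre : pvPre road)
    (l : List (Int × Int)) (v : Int) (hs : pvSteps road 1 l v)
    (hnd : ((1 : Int) :: l.map (·.1)).Nodup) : pvCost l ≤ (pvBn road : Int) := by
  have hcb : ∀ p ∈ l, p.2 ≤ (pvCostBound road : Int) := by
    intro p hp
    obtain ⟨a, ha⟩ := pv_steps_edge_mem road l 1 v hs p hp
    have h1 := pv_edge_cost_le road a p.1 p.2 ha
    have h2 := pv_edge_cost_nonneg road hpre a p.1 p.2 ha
    omega
  have hlen : l.length ≤ 2 * road.length := by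
    have hnd' : (l.map (·.1)).Nodup := hnd.of_cons
    have hsub : l.map (·.1) ⊆ (pvGraph road).keys := by
      intro a ha
      rcases List.mem_map.mp ha with ⟨p, hp, rfl⟩
      exact pv_steps_nodes_mem road l 1 v hs p hp
    have := pv_graph_keys_len road
    have hle : (l.map (·.1)).length ≤ (pvGraph road).keys.length := by
      have h1 := (List.toFinset_card_of_nodup hnd').symm
      calc (l.map (·.1)).length = (l.map (·.1)).toFinset.card := h1
        _ ≤ (pvGraph road).keys.toFinset.card := by
            apply Finset.card_le_card
            intro a ha; simp only [List.mem_toFinset] at ha ⊢; exact hsub ha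
        _ ≤ (pvGraph road).keys.length := List.toFinset_card_le _
    simpa using hle.trans this
  have hsum : pvCost l ≤ (l.length : Int) * (pvCostBound road : Int) := by
    clear hs hnd hlen
    induction l with
    | nil => simp [pvCost]
    | cons q t ih =>
      rw [pv_cost_cons, List.length_cons]
      have h1 := hcb q (List.mem_cons_self)
      have h2 := ih (fun p hp => hcb p (List.mem_cons_of_mem q hp))
      have h3 : (0 : Int) ≤ (pvCostBound road : Int) := Int.natCast_nonneg _
      push_cast
      push_cast at h2
      nlinarith
  have : (l.length : Int) * (pvCostBound road : Int) ≤ (pvBn road : Int) := by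
    unfold pvBn pvKeyBound
    push_cast
    nlinarith [Int.natCast_nonneg (pvCostBound road), Int.natCast_nonneg road.length]
  omega

theorem pv_fix_le_steps (road : List (Int × Int × Int)) (f : Int → Option Int)
    (hf : pvFix road f) :
    ∀ (l : List (Int × Int)) (u v x : Int), pvSteps road u l v → f u = some x →
      ∃ y, f v = some y ∧ y ≤ x + pvCost l := by
  intro l
  induction l with
  | nil =>
    intro u v x h hx
    cases h
    exact ⟨x, hx, by simp [pvCost]⟩
  | cons q t ih =>
    intro u v x h hx
    obtain ⟨q1, q2⟩ := q
    obtain ⟨h1, h2⟩ := h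
    obtain ⟨y, hy, hyl⟩ := hf u q1 q2 h1 x hx
    obtain ⟨z, hz, hzl⟩ := ih q1 v y h2 hy
    refine ⟨z, hz, ?_⟩
    rw [pv_cost_cons]
    simp only at *
    omega

theorem pv_agree (road : List (Int × Int × Int)) (f g : Int → Option Int)
    (hf : pvFix road f) (hg : pvFix road g) (hsf : pvWSound road f) (hsg : pvWSound road g)
    (hf1 : f 1 = some 0) (hg1 : g 1 = some 0) : ∀ v, f v = g v := by
  intro v
  cases hfv : f v with
  | none =>
    cases hgv : g v with
    | none => rfl
    | some y =>
      obtain ⟨l, hl, hc⟩ := hsg v y hgv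
      obtain ⟨z, hz, _⟩ := pv_fix_le_steps road f hf l 1 v 0 hl hf1
      rw [hfv] at hz; cases hz
  | some x =>
    cases hgv : g v with
    | none =>
      obtain ⟨l, hl, hc⟩ := hsf v x hfv
      obtain ⟨z, hz, _⟩ := pv_fix_le_steps road g hg l 1 v 0 hl hg1
      rw [hgv] at hz; cases hz
    | some y =>
      obtain ⟨l, hl, hc⟩ := hsf v x hfv
      obtain ⟨l', hl', hc'⟩ := hsg v y hgv
      obtain ⟨z, hz, hzl⟩ := pv_fix_le_steps road g hg l 1 v 0 hl hg1
      obtain ⟨w, hw, hwl⟩ := pv_fix_le_steps road f hf l' 1 v 0 hl' hf1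
      rw [hgv] at hz; cases hz
      rw [hfv] at hw; cases hw
      have : x = y := by omega
      rw [this]

theorem pv_sinv_wsound (road : List (Int × Int × Int)) (f : Int → Option Int)
    (h : pvSInv road f) : pvWSound road f := by
  intro v x hv
  obtain ⟨l, h1, h2, _, _⟩ := h v x hv
  exact ⟨l, h1, h2⟩


theorem pv_steps_suffix (road : List (Int × Int × Int)) :
    ∀ (l1 : List (Int × Int)) (s w c v : Int) (l2 : List (Int × Int)),
      pvSteps road s (l1 ++ (w, c) :: l2) v → pvSteps road w l2 v := by
  intro l1
  induction l1 with
  | nil => intro s w c v l2 h; exact h.2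
  | cons q t ih =>
    intro s w c v l2 h
    obtain ⟨q1, q2⟩ := q
    exact ih q1 w c v l2 h.2

theorem pv_split_snoc {α : Type} (l l1 l2 : List α) (p q : α)
    (h : l ++ [p] = l1 ++ q :: l2) :
    (l2 = [] ∧ l1 = l ∧ q = p) ∨ (∃ l2', l2 = l2' ++ [p] ∧ l = l1 ++ q :: l2') := by
  rcases List.eq_nil_or_concat l2 with rfl | ⟨l2', p', rfl⟩
  · have := List.append_inj' h (by simp)
    exact Or.inl ⟨rfl, this.1.symm, by simpa using this.2.symm⟩
  · have h' : l ++ [p] = (l1 ++ q :: l2') ++ [p'] := by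
      rw [h]; simp
    have := List.append_inj' h' (by simp)
    have hpp : p = p' := by simpa using this.2
    exact Or.inr ⟨l2', by rw [List.concat_eq_append, hpp], this.1⟩

-- the shared relaxation step: inserting x + c at v preserves the sound invariant
theorem pvSInv_insert (road : List (Int × Int × Int)) (hpre : pvPre road)
    (f : Int → Option Int) (u v c x : Int)
    (hs : pvSInv road f) (h1 : f 1 = some 0) (he : pvEdge road u v c) (hx : f u = some x)
    (hlt : ∀ y, f v = some y → x + c < y) :
    pvSInv road (fun w => if w = v then some (x + c) else f w) ∧ 0 ≤ x + c ∧ v ≠ 1 ∧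
      x + c ≤ (pvBn road : Int) := by
  obtain ⟨l, hsteps, hcost, hnodup, hpref⟩ := hs u x hx
  have hc0 : 0 ≤ c := pv_edge_cost_nonneg road hpre u v c he
  have hx0 : 0 ≤ x := hcost ▸ pv_cost_nonneg road hpre l 1 u hsteps
  have hxc0 : 0 ≤ x + c := by omega
  have hvfresh : v ∉ (1 : Int) :: l.map (·.1) := by
    intro hv
    rcases List.mem_cons.mp hv with hv1 | hvl
    · subst hv1
      have := hlt 0 h1
      omega
    · rcases List.mem_map.mp hvl with ⟨p, hp, hp1⟩
      obtain ⟨pre, suf, hdec⟩ := List.append_of_mem hp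
      obtain ⟨pv', pc⟩ := p
      simp only at hp1
      obtain ⟨y, hy, hyl⟩ := hpref pre pv' pc suf hdec
      rw [hp1] at hy
      have hlt' := hlt y hy
      have hsuf : pvSteps road pv' suf u := pv_steps_suffix road pre 1 pv' pc u suf (hdec ▸ hsteps)
      have hsufc : 0 ≤ pvCost suf := pv_cost_nonneg road hpre suf pv' u hsuf
      have hdecc : pvCost l = pvCost pre + pc + pvCost suf := by
        rw [hdec]; simp [pvCost]; ring
      omega
  have hsteps' : pvSteps road 1 (l ++ [(v, c)]) v := pv_steps_append road l u v c 1 hsteps he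
  have hcost' : pvCost (l ++ [(v, c)]) = x + c := by rw [pv_cost_append, hcost]
  have hnodup' : ((1 : Int) :: (l ++ [(v, c)]).map (·.1)).Nodup := by
    have : (1 : Int) :: (l ++ [(v, c)]).map (·.1) = ((1 : Int) :: l.map (·.1)) ++ [v] := by simp
    rw [this, List.nodup_append]
    refine ⟨hnodup, List.nodup_singleton _, ?_⟩
    intro a ha b hb
    rw [List.mem_singleton] at hb
    subst hb
    exact fun hab => hvfresh (hab ▸ ha)
  have hv1 : v ≠ 1 := by
    intro hv1
    exact hvfresh (hv1 ▸ List.mem_cons_self)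
  have hbound : x + c ≤ (pvBn road : Int) := by
    have := pv_cost_le_bound road hpre (l ++ [(v, c)]) v hsteps' hnodup'
    omega
  refine ⟨?_, hxc0, hv1, hbound⟩
  intro w z hz
  by_cases hwv : w = v
  · subst w
    simp only [if_pos rfl] at hz
    cases hz
    refine ⟨l ++ [(v, c)], hsteps', hcost', hnodup', ?_⟩
    intro l1 w' cc l2 hdec
    rcases pv_split_snoc l l1 l2 (v, c) (w', cc) hdec with ⟨-, hl1, hq⟩ | ⟨l2', -, hl⟩
    · injection hq with hq1 hq2
      refine ⟨x + c, by simp [hq1], ?_⟩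
      rw [hq2, hl1]
      omega
    · have hw'mem : w' ∈ l.map (·.1) := by
        rw [hl]; simp
      have hw'v : w' ≠ v := fun hh => hvfresh (hh ▸ List.mem_cons_of_mem _ hw'mem)
      obtain ⟨y, hy, hyl⟩ := hpref l1 w' cc l2' hl
      exact ⟨y, by simp [hw'v, hy], hyl⟩
  · simp only [if_neg hwv] at hz
    obtain ⟨l0, hst0, hc0', hnd0, hpf0⟩ := hs w z hz
    refine ⟨l0, hst0, hc0', hnd0, ?_⟩
    intro l1 w' cc l2 hdec
    obtain ⟨y, hy, hyl⟩ := hpf0 l1 w' cc l2 hdec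
    by_cases hw'v : w' = v
    · subst hw'v
      have := hlt y hy
      exact ⟨x + c, by simp, by omega⟩
    · exact ⟨y, by simp [hw'v, hy], hyl⟩

-- ---------- measure lemmas ----------

theorem pv_sum_update (keys : List Int) (v : Int) (f g : Int → Nat)
    (hnd : keys.Nodup) (hv : v ∈ keys) (hfg : ∀ k ∈ keys, k ≠ v → g k = f k) :
    (keys.map g).sum + f v = (keys.map f).sum + g v := by
  induction keys with
  | nil => simp at hv
  | cons k ks ih =>
    by_cases hkv : k = v
    · subst hkv
      have hnotin : k ∉ ks := (List.nodup_cons.mp hnd).1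
      have heq : ∀ k' ∈ ks, g k' = f k' := by
        intro k' hk'
        exact hfg k' (List.mem_cons_of_mem _ hk') (fun hh => hnotin (hh ▸ hk'))
      have hmap : ks.map g = ks.map f := List.map_congr_left heq
      simp only [List.map_cons, List.sum_cons, hmap]
      omega
    · have hv' : v ∈ ks := by
        rcases List.mem_cons.mp hv with h | h
        · exact absurd h.symm hkv
        · exact h
      have := ih (List.nodup_cons.mp hnd).2 hv'
        (fun k' hk' hne => hfg k' (List.mem_cons_of_mem _ hk') hne)
      simp only [List.map_cons, List.sum_cons]
      rw [hfg k List.mem_cons_self hkv]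
      omega

theorem pv_M_insert_lt (road : List (Int × Int × Int)) (keys : List Int) (v : Int)
    (f : Int → Option Int) (x : Int)
    (hnd : keys.Nodup) (hv : v ∈ keys) (hx0 : 0 ≤ x) (hxB : x ≤ (pvBn road : Int))
    (hlt : ∀ y, f v = some y → x < y) :
    pvM keys (pvBn road) (fun w => if w = v then some x else f w) < pvM keys (pvBn road) f := by
  unfold pvM
  have hupd := pv_sum_update keys v (fun k => pvRank (pvBn road) (f k))
    (fun k => pvRank (pvBn road) (if k = v then some x else f k)) hnd hv
    (fun k _ hk => by simp [hk])
  simp only [if_true] at hupd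
  have hrank : pvRank (pvBn road) (some x) < pvRank (pvBn road) (f v) := by
    cases hfv : f v with
    | none =>
      simp only [pvRank]
      omega
    | some y =>
      have := hlt y hfv
      simp only [pvRank]
      omega
  have hgoal : (keys.map (fun k => pvRank (pvBn road) (if k = v then some x else f k))).sum
      < (keys.map (fun k => pvRank (pvBn road) (f k))).sum := by omega
  simpa using hgoal

theorem pv_M_le (keys : List Int) (B : Nat) (f : Int → Option Int)
    (h : ∀ k ∈ keys, pvRank B (f k) ≤ B + 1) :
    pvM keys B f ≤ keys.length * (B + 1) := by
  unfold pvM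
  induction keys with
  | nil => simp
  | cons k ks ih =>
    simp only [List.map_cons, List.sum_cons, List.length_cons]
    have h1 := h k List.mem_cons_self
    have h2 := ih (fun k' hk' => h k' (List.mem_cons_of_mem _ hk'))
    calc pvRank B (f k) + (ks.map (fun k => pvRank B (f k))).sum
        ≤ (B + 1) + ks.length * (B + 1) := by omega
      _ = (ks.length + 1) * (B + 1) := by ring

-- ---------- A-side invariant ----------

structure PvStA (road : List (Int × Int × Int)) (d : PySem.Dict Int (Option Int))
    (q : List (Int × Int)) : Prop where
  keys_eq : d.keys = pvKeysA road
  one : d.getD 1 none = some 0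
  sound : pvSInv road (fun v => d.getD v none)
  fin : ∀ v x, d.getD v none = some x → v ∈ pvKeysA road
  hq : ∀ p u, (p, u) ∈ q → ∃ x, d.getD u none = some x ∧ x ≤ p

structure PvInvA (road : List (Int × Int × Int)) (d : PySem.Dict Int (Option Int))
    (q : List (Int × Int)) : Prop where
  st : PvStA road d q
  cov : ∀ u v c, pvEdge road u v c → ∀ x, d.getD u none = some x →
        (∃ y, d.getD v none = some y ∧ y ≤ x + c) ∨ (x, u) ∈ q

theorem pv_mem_heappush (q : List (Int × Int)) (it a : Int × Int) :
    a ∈ pvHeappush q it ↔ a ∈ q ∨ a = it := by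
  rw [(pvHeappush_perm q it).mem_iff]
  simp

theorem pv_len_heappush (q : List (Int × Int)) (it : Int × Int) :
    (pvHeappush q it).length = q.length + 1 := by
  rw [(pvHeappush_perm q it).length_eq]
  simp

theorem pvRelaxFold (road : List (Int × Int × Int)) (hpre : pvPre road) (u cd : Int) :
    ∀ (rest : List (Int × Int)) (d : PySem.Dict Int (Option Int)) (q : List (Int × Int)),
      (∀ p ∈ rest, p ∈ (pvGraph road).getD u []) →
      PvStA road d q →
      d.getD u none = some cd →
      (∀ u' v c, pvEdge road u' v c → ∀ x, d.getD u' none = some x →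
        (∃ y, d.getD v none = some y ∧ y ≤ x + c) ∨ (x, u') ∈ q ∨ (u' = u ∧ (v, c) ∈ rest)) →
      let st' := rest.foldl
        (fun (st : PySem.Dict Int (Option Int) × List (Int × Int)) av =>
          let distance := cd + av.2
          if pvLtIntOpt distance (st.1.getD av.1 none) then
            (st.1.insert av.1 (some distance), pvHeappush st.2 (distance, av.1))
          else st) (d, q)
      PvInvA road st'.1 st'.2 ∧
        2 * pvM (pvKeysA road) (pvBn road) (fun v => st'.1.getD v none) + st'.2.length ≤
          2 * pvM (pvKeysA road) (pvBn road) (fun v => d.getD v none) + q.length := by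
  intro rest
  induction rest with
  | nil =>
    intro d q hsub hst hm hcov
    refine ⟨⟨hst, ?_⟩, le_refl _⟩
    intro u' v c he x hx
    rcases hcov u' v c he x hx with h | h | ⟨-, h⟩
    · exact Or.inl h
    · exact Or.inr h
    · simp at h
  | cons av rest ih =>
    obtain ⟨v, c⟩ := av
    intro d q hsub hst hm hcov
    simp only [List.foldl_cons]
    have hadj : (v, c) ∈ (pvGraph road).getD u [] := hsub (v, c) List.mem_cons_self
    have he : pvEdge road u v c := (pv_mem_adj road u v c).mp hadj
    have hc0 : 0 ≤ c := pv_edge_cost_nonneg road hpre u v c he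
    by_cases hrel : pvLtIntOpt (cd + c) (d.getD v none) = true
    · rw [if_pos hrel]
      have hlt : ∀ y, d.getD v none = some y → cd + c < y := by
        intro y hy
        rw [hy] at hrel
        simpa [pvLtIntOpt] using hrel
      have hvu : v ≠ u := by
        intro hvu
        have := hlt cd (hvu ▸ hm)
        omega
      have hins := pvSInv_insert road hpre (fun w => d.getD w none) u v c cd
        hst.sound hst.one he hm hlt
      have hfeq : (fun w => (d.insert v (some (cd + c))).getD w none) =
          (fun w => if w = v then some (cd + c) else d.getD w none) := by
        funext w
        rw [PySem.Dict.getD_insert]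
      have hvkeys : v ∈ pvKeysA road :=
        pv_graph_keys_subset road v (pv_edge_endpoints road u v c he).2
      have hcont : (d.insert v (some (cd + c))).keys = pvKeysA road := by
        rw [PySem.Dict.keys_insert_of_contains]
        · exact hst.keys_eq
        · rw [PySem.Dict.contains_iff_mem_keys, hst.keys_eq]
          exact hvkeys
      have hst' : PvStA road (d.insert v (some (cd + c))) (pvHeappush q (cd + c, v)) := by
        refine ⟨hcont, ?_, ?_, ?_, ?_⟩
        · rw [PySem.Dict.getD_insert, if_neg (fun hh : (1 : Int) = v => hins.2.2.1 hh.symm)]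
          exact hst.one
        · rw [hfeq]; exact hins.1
        · intro w z hz
          rw [PySem.Dict.getD_insert] at hz
          by_cases hwv : w = v
          · exact hwv ▸ hvkeys
          · rw [if_neg hwv] at hz
            exact hst.fin w z hz
        · intro p w hw
          rcases (pv_mem_heappush q _ _).mp hw with hw | hw
          · obtain ⟨x0, hx0, hx0le⟩ := hst.hq p w hw
            by_cases hwv : w = v
            · subst w
              have := hlt x0 hx0
              refine ⟨cd + c, ?_, by omega⟩
              rw [PySem.Dict.getD_insert, if_pos rfl]
            · refine ⟨x0, ?_, hx0le⟩
              rw [PySem.Dict.getD_insert, if_neg hwv]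
              exact hx0
          · injection hw with hw1 hw2
            subst hw1; subst hw2
            refine ⟨cd + c, ?_, le_refl _⟩
            rw [PySem.Dict.getD_insert, if_pos rfl]
      have hm' : (d.insert v (some (cd + c))).getD u none = some cd := by
        rw [PySem.Dict.getD_insert, if_neg (fun hh : u = v => hvu hh.symm)]
        exact hm
      have hcov' : ∀ u' v' c', pvEdge road u' v' c' →
          ∀ x, (d.insert v (some (cd + c))).getD u' none = some x →
          (∃ y, (d.insert v (some (cd + c))).getD v' none = some y ∧ y ≤ x + c') ∨
            (x, u') ∈ pvHeappush q (cd + c, v) ∨ (u' = u ∧ (v', c') ∈ rest) := by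
        intro u' v' c' he' x hx
        by_cases hu'v : u' = v
        · subst u'
          rw [PySem.Dict.getD_insert, if_pos rfl] at hx
          cases hx
          exact Or.inr (Or.inl ((pv_mem_heappush q _ _).mpr (Or.inr rfl)))
        · rw [PySem.Dict.getD_insert, if_neg hu'v] at hx
          rcases hcov u' v' c' he' x hx with ⟨y, hy, hyl⟩ | hqm | ⟨hu, hmem⟩
          · by_cases hv'v : v' = v
            · subst v'
              have := hlt y hy
              refine Or.inl ⟨cd + c, ?_, by omega⟩
              rw [PySem.Dict.getD_insert, if_pos rfl]
            · refine Or.inl ⟨y, ?_, hyl⟩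
              rw [PySem.Dict.getD_insert, if_neg hv'v]
              exact hy
          · exact Or.inr (Or.inl ((pv_mem_heappush q _ _).mpr (Or.inl hqm)))
          · rcases List.mem_cons.mp hmem with heq | hmem'
            · -- the edge just relaxed
              injection heq with he1 he2
              rw [he1, he2]
              have hxcd : x = cd := by
                have hx' := hx
                rw [hu, hm] at hx'
                exact (Option.some_inj.mp hx').symm
              refine Or.inl ⟨cd + c, ?_, ?_⟩
              · rw [PySem.Dict.getD_insert, if_pos rfl]
              · omega
            · exact Or.inr (Or.inr ⟨hu, hmem'⟩)
      have hmono := ih (d.insert v (some (cd + c))) (pvHeappush q (cd + c, v))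
        (fun p hp => hsub p (List.mem_cons_of_mem _ hp)) hst' hm' hcov'
      refine ⟨hmono.1, ?_⟩
      refine le_trans hmono.2 ?_
      have hMlt : pvM (pvKeysA road) (pvBn road)
          (fun w => (d.insert v (some (cd + c))).getD w none) <
          pvM (pvKeysA road) (pvBn road) (fun w => d.getD w none) := by
        rw [hfeq]
        exact pv_M_insert_lt road (pvKeysA road) v (fun w => d.getD w none) (cd + c)
          (pv_nodup_keysA road) hvkeys hins.2.1 hins.2.2.2 hlt
      rw [pv_len_heappush]
      omega
    · rw [if_neg hrel]
      apply ih d q (fun p hp => hsub p (List.mem_cons_of_mem _ hp)) hst hm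
      intro u' v' c' he' x hx
      rcases hcov u' v' c' he' x hx with h | h | ⟨hu, hmem⟩
      · exact Or.inl h
      · exact Or.inr (Or.inl h)
      · rcases List.mem_cons.mp hmem with heq | hmem'
        · injection heq with he1 he2
          rw [he1, he2]
          have hxcd : x = cd := by
            have hx' := hx
            rw [hu, hm] at hx'
            exact (Option.some_inj.mp hx').symm
          cases hdv : d.getD v none with
          | none =>
            exfalso
            apply hrel
            rw [hdv]
            rfl
          | some y =>
            have hy : ¬ (cd + c < y) := by
              intro hy
              apply hrel
              rw [hdv]
              simp [pvLtIntOpt, hy]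
            exact Or.inl ⟨y, rfl, by omega⟩
        · exact Or.inr (Or.inr ⟨hu, hmem'⟩)

theorem pvDijkLoopPost (road : List (Int × Int × Int)) (hpre : pvPre road) :
    ∀ (fuel : Nat) (d : PySem.Dict Int (Option Int)) (q : List (Int × Int)),
      PvInvA road d q →
      2 * pvM (pvKeysA road) (pvBn road) (fun v => d.getD v none) + q.length < fuel →
      let r := pvDijkLoop (pvGraph road) d q fuel
      r.keys = pvKeysA road ∧ r.getD 1 none = some 0 ∧
        pvWSound road (fun v => r.getD v none) ∧ pvFix road (fun v => r.getD v none) ∧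
        (∀ v x, r.getD v none = some x → v ∈ pvKeysA road) := by
  intro fuel
  induction fuel with
  | zero => intro d q _ hlt; omega
  | succ fuel ih =>
    intro d q hinv hfuel
    show (pvDijkLoop (pvGraph road) d q (fuel + 1)).keys = pvKeysA road ∧ _
    rw [pvDijkLoop]
    by_cases hq : q.isEmpty
    · rw [if_pos hq]
      have hqnil : q = [] := List.isEmpty_iff.mp hq
      subst hqnil
      refine ⟨hinv.st.keys_eq, hinv.st.one, pv_sinv_wsound road _ hinv.st.sound, ?_, hinv.st.fin⟩
      intro u v c he x hx
      rcases hinv.cov u v c he x hx with ⟨y, hy, hyl⟩ | h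
      · exact ⟨y, hy, hyl⟩
      · simp at h
    · rw [if_neg hq]
      have hqne : q ≠ [] := fun hh => hq (hh ▸ rfl)
      have hperm := pvHeappop_perm q hqne
      set pr := pvHeappop q with hpr
      have hmem : pr.1 ∈ q := hperm.symm.subset List.mem_cons_self
      have hlen : q.length = pr.2.length + 1 := by
        have := hperm.length_eq
        simpa using this
      have hmem' : ((pr.1.1, pr.1.2) : Int × Int) ∈ q := by simpa using hmem
      obtain ⟨x0, hx0, hx0le⟩ := hinv.st.hq pr.1.1 pr.1.2 hmem'
      have hsub : ∀ a, a ∈ pr.2 → a ∈ q := fun a ha =>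
        hperm.symm.subset (List.mem_cons_of_mem _ ha)
      by_cases hskip : pvLtOptInt (d.getD pr.1.2 none) pr.1.1 = true
      · rw [if_pos hskip]
        have hinv' : PvInvA road d pr.2 := by
          refine ⟨⟨hinv.st.keys_eq, hinv.st.one, hinv.st.sound, hinv.st.fin, ?_⟩, ?_⟩
          · intro p w hw
            exact hinv.st.hq p w (hsub _ hw)
          · intro u' v c he x hx
            rcases hinv.cov u' v c he x hx with h | h
            · exact Or.inl h
            · rcases List.mem_cons.mp (hperm.subset h) with h' | h'
              · exfalso
                have h1 : u' = pr.1.2 := congrArg Prod.snd h'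
                have h2 : x = pr.1.1 := congrArg Prod.fst h'
                rw [h1, hx0] at hx
                rw [hx0] at hskip
                simp only [pvLtOptInt, decide_eq_true_eq] at hskip
                have : x = x0 := (Option.some_inj.mp hx).symm
                omega
              · exact Or.inr h'
        exact ih d pr.2 hinv' (by omega)
      · rw [if_neg hskip]
        have hm : d.getD pr.1.2 none = some pr.1.1 := by
          rw [hx0] at hskip ⊢
          simp only [pvLtOptInt, decide_eq_true_eq] at hskip
          have : x0 = pr.1.1 := by omega
          rw [this]
        have hcov' : ∀ u' v c, pvEdge road u' v c → ∀ x, d.getD u' none = some x →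
            (∃ y, d.getD v none = some y ∧ y ≤ x + c) ∨ (x, u') ∈ pr.2 ∨
              (u' = pr.1.2 ∧ (v, c) ∈ (pvGraph road).getD pr.1.2 []) := by
          intro u' v c he x hx
          rcases hinv.cov u' v c he x hx with h | h
          · exact Or.inl h
          · rcases List.mem_cons.mp (hperm.subset h) with h' | h'
            · have h1 : u' = pr.1.2 := congrArg Prod.snd h'
              refine Or.inr (Or.inr ⟨h1, ?_⟩)
              rw [← h1]
              exact (pv_mem_adj road u' v c).mpr he
            · exact Or.inr (Or.inl h')
        have hrf := pvRelaxFold road hpre pr.1.2 pr.1.1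
          ((pvGraph road).getD pr.1.2 []) d pr.2 (fun p hp => hp)
          ⟨hinv.st.keys_eq, hinv.st.one, hinv.st.sound, hinv.st.fin,
            fun p w hw => hinv.st.hq p w (hsub _ hw)⟩ hm hcov'
        exact ih _ _ hrf.1 (by omega)

-- initial state of A
theorem pv_dist1_getD (road : List (Int × Int × Int)) (v : Int) :
    (((pvGraph road).keys.foldl (fun d k => d.insert k (none : Option Int))
        PySem.Dict.empty).insert 1 (some 0)).getD v none = if v = 1 then some 0 else none := by
  rw [PySem.Dict.getD_insert]
  split
  · rfl
  · have : ∀ (ks : List Int) (d : PySem.Dict Int (Option Int)),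
        (∀ w, d.getD w none = none) →
        ∀ w, (ks.foldl (fun d k => d.insert k (none : Option Int)) d).getD w none = none := by
      intro ks
      induction ks with
      | nil => intro d hd w; exact hd w
      | cons k t ih =>
        intro d hd w
        rw [List.foldl_cons]
        apply ih
        intro w'
        rw [PySem.Dict.getD_insert]
        split
        · rfl
        · exact hd w'
    exact this _ _ (fun w => PySem.Dict.getD_empty w none) v

theorem pv_dist1_keys (road : List (Int × Int × Int)) :
    (((pvGraph road).keys.foldl (fun d k => d.insert k (none : Option Int))
        PySem.Dict.empty).insert 1 (some 0)).keys = pvKeysA road := by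
  have hfold : ∀ (ks : List Int) (d : PySem.Dict Int (Option Int)),
      ks.Nodup → (∀ k ∈ ks, d.contains k = false) →
      (ks.foldl (fun d k => d.insert k (none : Option Int)) d).keys = d.keys ++ ks := by
    intro ks
    induction ks with
    | nil => intro d _ _; simp
    | cons k t ih =>
      intro d hnd hc
      rw [List.foldl_cons]
      have h1 : (d.insert k (none : Option Int)).keys = d.keys ++ [k] :=
        PySem.Dict.keys_insert_of_not_contains d _ (hc k List.mem_cons_self)
      have h2 : ∀ k' ∈ t, (d.insert k (none : Option Int)).contains k' = false := by
        intro k' hk'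
        rw [PySem.Dict.contains_insert]
        have hne : k' ≠ k := fun hh => (List.nodup_cons.mp hnd).1 (hh ▸ hk')
        simp [hne, hc k' (List.mem_cons_of_mem _ hk')]
      rw [ih _ (List.nodup_cons.mp hnd).2 h2, h1]
      simp
  have hkeys0 : ((pvGraph road).keys.foldl (fun d k => d.insert k (none : Option Int))
      PySem.Dict.empty).keys = (pvGraph road).keys := by
    rw [hfold _ _ (pv_nodup_graph_keys road) (fun k _ => by simp [PySem.Dict.contains_empty])]
    simp [PySem.Dict.keys_empty]
  by_cases h1 : (1 : Int) ∈ (pvGraph road).keys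
  · have hcont : ((pvGraph road).keys.foldl (fun d k => d.insert k (none : Option Int))
        PySem.Dict.empty).contains 1 = true := by
      rw [PySem.Dict.contains_iff_mem_keys, hkeys0]; exact h1
    rw [PySem.Dict.keys_insert_of_contains _ _ hcont, hkeys0]
    unfold pvKeysA
    rw [if_pos h1]
  · have hcont : ((pvGraph road).keys.foldl (fun d k => d.insert k (none : Option Int))
        PySem.Dict.empty).contains 1 = false := by
      rw [← Bool.not_eq_true, PySem.Dict.contains_iff_mem_keys, hkeys0]; exact h1
    rw [PySem.Dict.keys_insert_of_not_contains _ _ hcont, hkeys0]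
    unfold pvKeysA
    rw [if_neg h1]

-- ---------- B-side invariant ----------

structure PvInvB (road : List (Int × Int × Int)) (d : PySem.Dict Int Int) : Prop where
  one : d.get? 1 = some 0
  sound : pvSInv road (fun v => d.get? v)
  fin : ∀ v x, d.get? v = some x → v ∈ pvKeysA road
  nd : d.keys.Nodup

def pvRelaxed (d : PySem.Dict Int Int) (e : Int × Int × Int) : Prop :=
  ∀ x, d.get? e.1 = some x → ∃ y, d.get? e.2.1 = some y ∧ y ≤ x + e.2.2

theorem pvBFPassPost (road : List (Int × Int × Int)) (hpre : pvPre road) :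
    ∀ (edges : List (Int × Int × Int)) (st : PySem.Dict Int Int × Bool),
      (∀ e ∈ edges, e ∈ pvEdges road) →
      PvInvB road st.1 →
      let st' := pvBFPass edges st
      PvInvB road st'.1 ∧
        pvM (pvKeysA road) (pvBn road) (fun v => st'.1.get? v) ≤
          pvM (pvKeysA road) (pvBn road) (fun v => st.1.get? v) ∧
        (st'.2 = false → st'.1 = st.1 ∧ st.2 = false ∧ ∀ e ∈ edges, pvRelaxed st.1 e) ∧
        (st.2 = false → st'.2 = true →
          pvM (pvKeysA road) (pvBn road) (fun v => st'.1.get? v) <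
            pvM (pvKeysA road) (pvBn road) (fun v => st.1.get? v)) := by
  intro edges
  induction edges with
  | nil =>
    intro st hsub hinv
    refine ⟨hinv, le_refl _, ?_, ?_⟩
    · intro h
      exact ⟨rfl, h, fun e he => absurd he (List.not_mem_nil)⟩
    · intro h1 h2
      rw [show pvBFPass [] st = st from rfl] at h2
      rw [h1] at h2
      cases h2
  | cons e es ih =>
    intro st hsub hinv
    have hedge : pvEdge road e.1 e.2.1 e.2.2 :=
      pv_edges_edge road e (hsub e List.mem_cons_self)
    have hsub' : ∀ e' ∈ es, e' ∈ pvEdges road :=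
      fun e' he' => hsub e' (List.mem_cons_of_mem _ he')
    show (let st' := pvBFPass (e :: es) st; _) ∧ _ ∧ _ ∧ _
    have hunf : pvBFPass (e :: es) st = pvBFPass es
        (match st.1.get? e.1 with
         | none => st
         | some du =>
           let nd := du + e.2.2
           match st.1.get? e.2.1 with
           | none => (st.1.insert e.2.1 nd, true)
           | some dv => if nd < dv then (st.1.insert e.2.1 nd, true) else st) := rfl
    cases hget1 : st.1.get? e.1 with
    | none =>
      have hstep : pvBFPass (e :: es) st = pvBFPass es st := by rw [hunf, hget1]
      rw [hstep]
      obtain ⟨h1, h2, h3, h4⟩ := ih st hsub' hinv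
      refine ⟨h1, h2, ?_, h4⟩
      intro hf
      obtain ⟨ha, hb, hc⟩ := h3 hf
      refine ⟨ha, hb, ?_⟩
      intro e' he'
      rcases List.mem_cons.mp he' with rfl | he''
      · intro x hx
        rw [hget1] at hx
        cases hx
      · exact hc e' he''
    | some du =>
      have hrelax : ∀ (hlt : ∀ y, st.1.get? e.2.1 = some y → du + e.2.2 < y),
          (pvBFPass (e :: es) st = pvBFPass es (st.1.insert e.2.1 (du + e.2.2), true)) →
          PvInvB road (pvBFPass (e :: es) st).1 ∧
            pvM (pvKeysA road) (pvBn road) (fun v => (pvBFPass (e :: es) st).1.get? v) ≤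
              pvM (pvKeysA road) (pvBn road) (fun v => st.1.get? v) ∧
            ((pvBFPass (e :: es) st).2 = false → (pvBFPass (e :: es) st).1 = st.1 ∧
              st.2 = false ∧ ∀ e' ∈ e :: es, pvRelaxed st.1 e') ∧
            (st.2 = false → (pvBFPass (e :: es) st).2 = true →
              pvM (pvKeysA road) (pvBn road) (fun v => (pvBFPass (e :: es) st).1.get? v) <
                pvM (pvKeysA road) (pvBn road) (fun v => st.1.get? v)) := by
        intro hlt hstep
        have hins := pvSInv_insert road hpre (fun w => st.1.get? w) e.1 e.2.1 e.2.2 du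
          hinv.sound hinv.one hedge hget1 hlt
        have hfeq : (fun w => (st.1.insert e.2.1 (du + e.2.2)).get? w) =
            (fun w => if w = e.2.1 then some (du + e.2.2) else st.1.get? w) := by
          funext w
          rw [PySem.Dict.get?_insert]
        have hvkeys : e.2.1 ∈ pvKeysA road :=
          pv_graph_keys_subset road _ (pv_edge_endpoints road e.1 e.2.1 e.2.2 hedge).2
        have hinv1 : PvInvB road (st.1.insert e.2.1 (du + e.2.2)) := by
          refine ⟨?_, ?_, ?_, ?_⟩
          · rw [PySem.Dict.get?_insert,
              if_neg (fun hh : (1 : Int) = e.2.1 => hins.2.2.1 hh.symm)]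
            exact hinv.one
          · rw [hfeq]; exact hins.1
          · intro w z hz
            rw [PySem.Dict.get?_insert] at hz
            by_cases hwv : w = e.2.1
            · exact hwv ▸ hvkeys
            · rw [if_neg hwv] at hz
              exact hinv.fin w z hz
          · exact PySem.Dict.nodup_keys_insert _ _ _ hinv.nd
        have hMlt : pvM (pvKeysA road) (pvBn road)
            (fun w => (st.1.insert e.2.1 (du + e.2.2)).get? w) <
            pvM (pvKeysA road) (pvBn road) (fun w => st.1.get? w) := by
          rw [hfeq]
          exact pv_M_insert_lt road (pvKeysA road) e.2.1 (fun w => st.1.get? w) (du + e.2.2)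
            (pv_nodup_keysA road) hvkeys hins.2.1 hins.2.2.2 hlt
        rw [hstep]
        obtain ⟨h1, h2, h3, h4⟩ := ih (st.1.insert e.2.1 (du + e.2.2), true) hsub' hinv1
        dsimp only at h2 h4
        refine ⟨h1, by omega, ?_, ?_⟩
        · intro hf
          obtain ⟨-, hb, -⟩ := h3 hf
          cases hb
        · intro _ _
          omega
      cases hget2 : st.1.get? e.2.1 with
      | none =>
        have hlt : ∀ y, st.1.get? e.2.1 = some y → du + e.2.2 < y := by
          intro y hy
          rw [hget2] at hy
          cases hy
        exact hrelax hlt (by rw [hunf, hget1, hget2])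
      | some dv =>
        by_cases hcmp : du + e.2.2 < dv
        · have hlt : ∀ y, st.1.get? e.2.1 = some y → du + e.2.2 < y := by
            intro y hy
            rw [hget2] at hy
            cases hy
            exact hcmp
          exact hrelax hlt (by rw [hunf, hget1, hget2]; simp only [if_pos hcmp])
        · have hstep : pvBFPass (e :: es) st = pvBFPass es st := by
            rw [hunf, hget1, hget2]
            simp only [if_neg hcmp]
          rw [hstep]
          obtain ⟨h1, h2, h3, h4⟩ := ih st hsub' hinv
          refine ⟨h1, h2, ?_, h4⟩
          intro hf
          obtain ⟨ha, hb, hc⟩ := h3 hf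
          refine ⟨ha, hb, ?_⟩
          intro e' he'
          rcases List.mem_cons.mp he' with rfl | he''
          · intro x hx
            rw [hget1] at hx
            have hxdu : du = x := Option.some_inj.mp hx
            exact ⟨dv, hget2, by omega⟩
          · exact hc e' he''

theorem pvBFLoopPost (road : List (Int × Int × Int)) (hpre : pvPre road) :
    ∀ (fuel : Nat) (d : PySem.Dict Int Int),
      PvInvB road d →
      pvM (pvKeysA road) (pvBn road) (fun v => d.get? v) < fuel →
      let r := pvBFLoop (pvEdges road) d fuel
      PvInvB road r ∧ pvFix road (fun v => r.get? v) := by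
  intro fuel
  induction fuel with
  | zero => intro d _ hlt; omega
  | succ fuel ih =>
    intro d hinv hfuel
    show PvInvB road (pvBFLoop (pvEdges road) d (fuel + 1)) ∧ _
    rw [pvBFLoop]
    obtain ⟨h1, h2, h3, h4⟩ := pvBFPassPost road hpre (pvEdges road) (d, false)
      (fun e he => he) hinv
    dsimp only at h2 h4
    by_cases hch : (pvBFPass (pvEdges road) (d, false)).2 = true
    · rw [if_pos hch]
      have hlt := h4 rfl hch
      exact ih _ h1 (by omega)
    · rw [if_neg hch]
      have hch' : (pvBFPass (pvEdges road) (d, false)).2 = false := by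
        cases hc : (pvBFPass (pvEdges road) (d, false)).2
        · rfl
        · exact absurd hc hch
      obtain ⟨heq, -, hrel⟩ := h3 hch'
      rw [heq]
      refine ⟨hinv, ?_⟩
      intro u v c he x hx
      have hmem : ((u, v, c) : Int × Int × Int) ∈ pvEdges road := pv_edge_mem_edges road u v c he
      exact hrel (u, v, c) hmem x hx

-- ---------- counting ----------

theorem pv_countP_eq (l1 l2 : List Int) (p : Int → Bool)
    (h1 : l1.Nodup) (h2 : l2.Nodup) (hp : ∀ v, p v = true → v ∈ l1 ∧ v ∈ l2) :
    l1.countP p = l2.countP p := by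
  have hperm : (l1.filter p).Perm (l2.filter p) := by
    rw [List.perm_ext_iff_of_nodup (h1.filter p) (h2.filter p)]
    intro a
    simp only [List.mem_filter]
    constructor
    · rintro ⟨ha, hpa⟩; exact ⟨(hp a hpa).2, hpa⟩
    · rintro ⟨ha, hpa⟩; exact ⟨(hp a hpa).1, hpa⟩
  rw [List.countP_eq_length_filter, List.countP_eq_length_filter]
  exact hperm.length_eq

-- ===== VERDICT (by name: the statement is the Claim_ definition above) =====
theorem solution_spec : Claim_equal_solution := by
  intro N road K hdom hpre
  unfold Spec_solution
  have hpre' : pvPre road := hpre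
  -- ---- A side ----
  set d1 := ((pvGraph road).keys.foldl (fun d k => d.insert k (none : Option Int))
    PySem.Dict.empty).insert 1 (some 0) with hd1def
  have hgetd1 : ∀ v, d1.getD v none = if v = 1 then some 0 else none := pv_dist1_getD road
  have hkeysd1 : d1.keys = pvKeysA road := pv_dist1_keys road
  have hq0 : pvHeappush [] (((d1.getD 1 none).getD 0 : Int), 1) = [((0 : Int), (1 : Int))] := by
    rw [hgetd1 1, if_pos rfl]
    show pvHeappush [] ((0 : Int), (1 : Int)) = [((0 : Int), (1 : Int))]
    unfold pvHeappush
    rw [pvSiftdown]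
    norm_num
  have hinvA : PvInvA road d1 [((0 : Int), (1 : Int))] := by
    refine ⟨⟨hkeysd1, by rw [hgetd1 1, if_pos rfl], ?_, ?_, ?_⟩, ?_⟩
    · intro v x hx
      replace hx : d1.getD v none = some x := hx
      rw [hgetd1 v] at hx
      by_cases hv : v = 1
      · rw [if_pos hv] at hx
        cases hx
        subst hv
        refine ⟨[], ?_, rfl, by simp, ?_⟩
        · show (1 : Int) = 1
          rfl
        · intro l1 w c l2 habs
          exact absurd habs.symm (List.append_ne_nil_of_right_ne_nil _ (by simp))
      · rw [if_neg hv] at hx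
        cases hx
    · intro v x hx
      rw [hgetd1 v] at hx
      by_cases hv : v = 1
      · exact hv ▸ pv_one_mem_keysA road
      · rw [if_neg hv] at hx
        cases hx
    · intro p u hu
      rw [List.mem_singleton] at hu
      injection hu with h1 h2
      subst h1; subst h2
      exact ⟨0, by rw [hgetd1 1, if_pos rfl], le_refl 0⟩
    · intro u v c he x hx
      rw [hgetd1 u] at hx
      by_cases hu : u = 1
      · rw [if_pos hu] at hx
        have hx0 : x = 0 := (Option.some_inj.mp hx).symm
        subst hu; subst hx0
        exact Or.inr (List.mem_singleton.mpr rfl)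
      · rw [if_neg hu] at hx
        cases hx
  have hfuelA : 2 * pvM (pvKeysA road) (pvBn road) (fun v => d1.getD v none) +
      ([((0 : Int), (1 : Int))] : List (Int × Int)).length < pvFuelA road := by
    have hMle : pvM (pvKeysA road) (pvBn road) (fun v => d1.getD v none) ≤
        (pvKeysA road).length * (pvBn road + 1) := by
      apply pv_M_le
      intro k _
      rw [hgetd1 k]
      split
      · simp [pvRank]
      · simp [pvRank]
    have hlen := pv_length_keysA road
    have h2 : (pvKeysA road).length * (pvBn road + 1) ≤ pvKeyBound road * (pvBn road + 1) :=
      Nat.mul_le_mul_right _ hlen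
    have h3 : pvFuelA road = 2 * (pvKeyBound road * (pvBn road + 1)) + 2 * pvKeyBound road + 4 := by
      unfold pvFuelA pvBn
      ring
    simp only [List.length_singleton]
    omega
  obtain ⟨hkeysA, honeA, hwsA, hfixA, hfinA⟩ :=
    pvDijkLoopPost road hpre' (pvFuelA road) d1 [((0 : Int), (1 : Int))] hinvA hfuelA
  set rA := pvDijkLoop (pvGraph road) d1 [((0 : Int), (1 : Int))] (pvFuelA road) with hrAdef
  -- ---- B side ----
  set d0 := PySem.Dict.empty.insert (1 : Int) (0 : Int) with hd0def
  have hget0 : ∀ v, d0.get? v = if v = 1 then some 0 else none := by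
    intro v
    rw [hd0def, PySem.Dict.get?_insert]
    split
    · rfl
    · exact PySem.Dict.get?_empty v
  have hinvB : PvInvB road d0 := by
    refine ⟨by rw [hget0 1, if_pos rfl], ?_, ?_, ?_⟩
    · intro v x hx
      replace hx : d0.get? v = some x := hx
      rw [hget0 v] at hx
      by_cases hv : v = 1
      · rw [if_pos hv] at hx
        cases hx
        subst hv
        refine ⟨[], ?_, rfl, by simp, ?_⟩
        · show (1 : Int) = 1
          rfl
        · intro l1 w c l2 habs
          exact absurd habs.symm (List.append_ne_nil_of_right_ne_nil _ (by simp))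
      · rw [if_neg hv] at hx
        cases hx
    · intro v x hx
      rw [hget0 v] at hx
      by_cases hv : v = 1
      · exact hv ▸ pv_one_mem_keysA road
      · rw [if_neg hv] at hx
        cases hx
    · exact PySem.Dict.nodup_keys_insert _ _ _ PySem.Dict.nodup_keys_empty
  have hfuelB : pvM (pvKeysA road) (pvBn road) (fun v => d0.get? v) < pvFuelB road := by
    have hMle : pvM (pvKeysA road) (pvBn road) (fun v => d0.get? v) ≤
        (pvKeysA road).length * (pvBn road + 1) := by
      apply pv_M_le
      intro k _
      rw [hget0 k]
      split
      · simp [pvRank]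
      · simp [pvRank]
    have hlen := pv_length_keysA road
    have h2 : (pvKeysA road).length * (pvBn road + 1) ≤ pvKeyBound road * (pvBn road + 1) :=
      Nat.mul_le_mul_right _ hlen
    have h3 : pvFuelB road = pvKeyBound road * (pvBn road + 1) + pvKeyBound road + 2 := by
      unfold pvFuelB pvBn
      ring
    omega
  obtain ⟨hinvB', hfixB⟩ := pvBFLoopPost road hpre' (pvFuelB road) d0 hinvB hfuelB
  set rB := pvBFLoop (pvEdges road) d0 (pvFuelB road) with hrBdef
  -- ---- the two distance maps agree ----
  have hagree : ∀ v, rA.getD v none = rB.get? v :=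
    pv_agree road (fun v => rA.getD v none) (fun v => rB.get? v) hfixA hfixB hwsA
      (pv_sinv_wsound road _ hinvB'.sound) honeA hinvB'.one
  -- ---- A's return value ----
  have hAval : solution N road K =
      ((rA.keys.countP (fun t => pvLeOptInt (rA.getD t none) K) : Nat) : Int) := by
    show (let graph := pvGraph road
          let dist0 := graph.keys.foldl (fun d k => d.insert k (none : Option Int))
            PySem.Dict.empty
          let dist1 := dist0.insert 1 (some 0)
          let queue := pvHeappush [] ((dist1.getD 1 none).getD 0, 1)
          let costMap := pvDijkLoop graph dist1 queue (pvFuelA road)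
          costMap.keys.foldl (fun a t => if pvLeOptInt (costMap.getD t none) K then a + 1 else a) 0)
        = _
    dsimp only
    rw [← hd1def, hq0, ← hrAdef]
    rw [PySem.List.foldl_count_if (fun t => pvLeOptInt (rA.getD t none) K) rA.keys 0]
    simp
  -- ---- B's return value ----
  have hBval : solution_alt N road K =
      ((rB.keys.countP (fun k => decide (rB.getD k 0 ≤ K)) : Nat) : Int) := by
    show (let dist := pvBFLoop (pvEdges road) (PySem.Dict.empty.insert 1 0) (pvFuelB road)
          dist.values.foldl (fun a x => if x ≤ K then a + 1 else a) 0) = _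
    dsimp only
    rw [← hd0def, ← hrBdef]
    have hfn : (fun (a : Int) (x : Int) => if x ≤ K then a + 1 else a) =
        (fun (a : Int) (x : Int) => if (fun y => decide (y ≤ K)) x = true then a + 1 else a) := by
      funext a x
      simp
    rw [hfn, PySem.List.foldl_count_if (fun y => decide (y ≤ K)) rB.values 0]
    rw [PySem.Dict.values_eq_map_keys rB hinvB'.nd 0, List.countP_map]
    simp only [Int.zero_add]
    rfl
  -- ---- counts agree ----
  rw [hAval, hBval]
  have hBpred : rB.keys.countP (fun k => decide (rB.getD k 0 ≤ K)) =
      rB.keys.countP (fun t => pvLeOptInt (rA.getD t none) K) := by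
    apply List.countP_congr
    intro k hk
    have hsome : rB.get? k ≠ none := fun hnone =>
      (PySem.Dict.get?_eq_none_iff_not_mem_keys rB k).mp hnone hk
    cases hgk : rB.get? k with
    | none => exact absurd hgk hsome
    | some y =>
      have hgd : rB.getD k 0 = y := by
        rw [PySem.Dict.getD_eq_get?_getD, hgk]
        rfl
      rw [hgd, hagree k, hgk]
      simp [pvLeOptInt]
  rw [hBpred]
  have hcnt : rA.keys.countP (fun t => pvLeOptInt (rA.getD t none) K) =
      rB.keys.countP (fun t => pvLeOptInt (rA.getD t none) K) := by
    apply pv_countP_eq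
    · rw [hkeysA]
      exact pv_nodup_keysA road
    · exact hinvB'.nd
    · intro v hv
      cases hga : rA.getD v none with
      | none =>
        rw [hga] at hv
        simp [pvLeOptInt] at hv
      | some x =>
        constructor
        · rw [hkeysA]
          exact hfinA v x hga
        · by_contra hnmem
          have hnone : rB.get? v = none :=
            (PySem.Dict.get?_eq_none_iff_not_mem_keys rB v).mpr hnmem
          have hag := hagree v
          rw [hga, hnone] at hag
          cases hag
  rw [hcnt]
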